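-- pv_equiv track=rewrite | github.com/granttremel/genomics | ggene/seqs.py | convolve_generator
-- ===== SOURCE A (Python) =====
-- def convolve_generator(seq1, seq2):
--
--     seq_len = min(len(seq1), len(seq2))
--     seq1, seq2 = seq1[:seq_len], seq2[:seq_len]
--
--     start = seq_len // 2
--
--     for t in range(-start, start):
--
--         sslen = seq_len - abs(t)
--         seq1t = seq1[max(t, 0):max(t, 0) + sslen]
--         seq2t = seq2[max(-t, 0):max(-t, 0) + sslen]
--         yield seq1t, seq2t
-- ===== SOURCE B (Python) =====
-- def convolve_generator(seq1, seq2):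
--     n = min(len(seq1), len(seq2))
--     a, b = seq1[:n], seq2[:n]
--     half = n // 2
--     # Incremental peeling: each pair is obtained from its neighbour by removing
--     # one element from an end, instead of re-slicing per shift.
--     neg = []
--     x, y = a, b
--     for _ in range(half):
--         x, y = x[:-1], y[1:]
--         neg.append((x, y))
--     for p in reversed(neg):
--         yield p
--     x, y = a, b
--     for _ in range(half):
--         yield x, y
--         x, y = x[1:], y[:-1]
-- ===== Notes on version B (the rewrite author's own statement) =====
-- stated objective: alternative
-- what changed: Replaces per-shift slice computation (one fresh pair of slices with abs()/max() index arithmetic for each shift t) by incremental peeling: starting from the two truncated sequences, each successive pair is derived from the previous one by removing a single element from one end, with the negative-shift pairs accumulated in a list and emitted in reverse.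
import Mathlib
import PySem

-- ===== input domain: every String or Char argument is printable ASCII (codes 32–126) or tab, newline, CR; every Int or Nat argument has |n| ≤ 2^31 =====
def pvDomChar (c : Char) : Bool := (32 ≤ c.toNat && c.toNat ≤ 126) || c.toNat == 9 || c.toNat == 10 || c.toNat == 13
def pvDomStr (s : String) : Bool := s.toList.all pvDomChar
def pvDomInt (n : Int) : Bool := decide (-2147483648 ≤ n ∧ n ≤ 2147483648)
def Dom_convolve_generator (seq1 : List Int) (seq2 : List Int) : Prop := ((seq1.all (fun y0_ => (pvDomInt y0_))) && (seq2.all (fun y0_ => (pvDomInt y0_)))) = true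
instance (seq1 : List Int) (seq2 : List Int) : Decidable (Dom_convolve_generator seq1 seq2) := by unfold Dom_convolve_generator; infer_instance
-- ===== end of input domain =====

-- B replaces A's per-shift slicing (abs/max index arithmetic for each shift) by incremental
-- peeling: each pair is derived from its neighbour by removing one element from an end,
-- the negative-shift pairs accumulated and emitted in reverse (objective: alternative).

-- ===== PORT A =====
def convolve_generator (seq1 : List Int) (seq2 : List Int) : List (List Int × List Int) :=
  let seqLen : Int := min (PySem.List.len seq1) (PySem.List.len seq2)
  let s1 := PySem.List.slice seq1 none (some seqLen)
  let s2 := PySem.List.slice seq2 none (some seqLen)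
  let start := PySem.Int.floordiv seqLen 2
  (PySem.List.pyRange (-start) start 1).map (fun t =>
    let sslen := seqLen - |t|
    (PySem.List.slice s1 (some (max t 0)) (some (max t 0 + sslen)),
     PySem.List.slice s2 (some (max (-t) 0)) (some (max (-t) 0 + sslen))))

-- ===== PORT B =====
-- x[:-1] is List.dropLast and y[1:] is List.drop 1 (exact for every list; PySem.List.slice_to_neg_one / slice_from_one).
def pvPeelNeg : Nat → List Int → List Int → List (List Int × List Int)
  | 0, _, _ => []
  | k+1, x, y =>
      let x' := x.dropLast
      let y' := y.drop 1
      (x', y') :: pvPeelNeg k x' y'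

def pvPeelPos : Nat → List Int → List Int → List (List Int × List Int)
  | 0, _, _ => []
  | k+1, x, y => (x, y) :: pvPeelPos k (x.drop 1) y.dropLast

def convolve_generator_alt (seq1 : List Int) (seq2 : List Int) : List (List Int × List Int) :=
  let n : Int := min (PySem.List.len seq1) (PySem.List.len seq2)
  let a := PySem.List.slice seq1 none (some n)
  let b := PySem.List.slice seq2 none (some n)
  let half := (PySem.Int.floordiv n 2).toNat
  (pvPeelNeg half a b).reverse ++ pvPeelPos half a b

-- ===== PRECONDITION & SPEC =====
def Spec_convolve_generator (seq1 : List Int) (seq2 : List Int) (out : List (List Int × List Int)) : Prop := out = convolve_generator_alt seq1 seq2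
instance (seq1 : List Int) (seq2 : List Int) (out : List (List Int × List Int)) : Decidable (Spec_convolve_generator seq1 seq2 out) := by unfold Spec_convolve_generator; infer_instance

-- ===== CLAIM (what is proved, stated in full; the proofs are below) =====
def Claim_equal_convolve_generator : Prop := ∀ (seq1 : List Int) (seq2 : List Int), Dom_convolve_generator seq1 seq2 → Spec_convolve_generator seq1 seq2 (convolve_generator seq1 seq2)

-- ===== LEMMAS AND PROOFS =====

theorem pvPeelNeg_eq (k : Nat) : ∀ (x y : List Int),
    pvPeelNeg k x y = (List.range k).map (fun i => (x.take (x.length - (i+1)), y.drop (i+1))) := by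
  induction k with
  | zero => intro x y; simp [pvPeelNeg]
  | succ k ih =>
    intro x y
    rw [pvPeelNeg, List.range_succ_eq_map, List.map_cons, List.map_map]
    refine congrArg₂ _ ?_ ?_
    · simp [List.dropLast_eq_take]
    · rw [ih]
      refine List.map_congr_left (fun i hi => ?_)
      have h1 : x.dropLast.take (x.dropLast.length - (i+1)) = x.take (x.length - (i+1+1)) := by
        rw [List.dropLast_eq_take, List.take_take, List.length_take]
        congr 1; omega
      simp only [Function.comp, h1, List.drop_drop]
      congr 2
      omega

theorem pvPeelPos_eq (k : Nat) : ∀ (x y : List Int),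
    pvPeelPos k x y = (List.range k).map (fun t => (x.drop t, y.take (y.length - t))) := by
  induction k with
  | zero => intro x y; simp [pvPeelPos]
  | succ k ih =>
    intro x y
    rw [pvPeelPos, List.range_succ_eq_map, List.map_cons, List.map_map]
    refine congrArg₂ _ ?_ ?_
    · simp
    · rw [ih]
      refine List.map_congr_left (fun t ht => ?_)
      have h1 : y.dropLast.take (y.dropLast.length - t) = y.take (y.length - (t+1)) := by
        rw [List.dropLast_eq_take, List.take_take, List.length_take]
        congr 1; omega
      simp only [Function.comp, h1, List.drop_drop]
      congr 2
      omega

theorem reverse_map_range {α : Type} (f : Nat → α) (k : Nat) :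
    ((List.range k).map f).reverse = (List.range k).map (fun j => f (k - 1 - j)) := by
  apply List.ext_getElem
  · simp
  · intro i h1 h2
    simp only [List.getElem_reverse, List.length_map, List.length_range, List.getElem_map,
      List.getElem_range]

theorem convolve_generator_eq_alt (seq1 seq2 : List Int) :
    convolve_generator seq1 seq2 = convolve_generator_alt seq1 seq2 := by
  unfold convolve_generator convolve_generator_alt
  simp only [PySem.List.len_eq]
  set m : Nat := min seq1.length seq2.length with hm
  have hmin : min (seq1.length : Int) (seq2.length : Int) = (m : Int) := by
    simp [hm, Nat.cast_min]
  rw [hmin]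
  have hdiv : PySem.Int.floordiv (m : Int) 2 = ((m / 2 : Nat) : Int) := by
    exact_mod_cast PySem.Int.floordiv_natCast m 2
  rw [hdiv]
  set h : Nat := m / 2 with hh
  have hhm : h ≤ m := Nat.div_le_self m 2
  have hs1 : (PySem.List.slice seq1 none (some (m : Int))).length = m := by
    rw [PySem.List.slice_to_natCast]; simp [hm]
  have hs2 : (PySem.List.slice seq2 none (some (m : Int))).length = m := by
    rw [PySem.List.slice_to_natCast]; simp [hm]
  set s1 := PySem.List.slice seq1 none (some (m : Int)) with hs1def
  set s2 := PySem.List.slice seq2 none (some (m : Int)) with hs2def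
  simp only [Int.toNat_natCast]
  rw [pvPeelNeg_eq, pvPeelPos_eq, reverse_map_range, hs1, hs2,
      PySem.List.pyRange_one_append (-(h : Int)) 0 (h : Int) (by omega) (by omega),
      List.map_append]
  congr 1
  · -- negative shifts: A slices per shift, B's peel list reversed
    rw [PySem.List.pyRange_one]
    simp only [zero_sub, neg_neg, Int.toNat_natCast, List.map_map]
    refine List.map_congr_left (fun j hj => ?_)
    rw [List.mem_range] at hj
    set kk : Nat := h - j with hkk
    have hk1 : 1 ≤ kk := by omega
    have hkm : kk ≤ m := by omega
    have ht : (-(h : Int) + (j : Int)) = -(kk : Int) := by omega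
    have hidx : h - 1 - j + 1 = kk := by omega
    simp only [Function.comp, ht, hidx, abs_neg, Int.abs_natCast, neg_neg]
    have hmax1 : max (-(kk : Int)) 0 = 0 := by omega
    have hmax2 : max ((kk : Int)) 0 = (kk : Int) := by omega
    rw [hmax1, hmax2]
    refine Prod.ext ?_ ?_
    · have he : (0 : Int) + ((m : Int) - (kk : Int)) = ((m - kk : Nat) : Int) := by omega
      simp only [PySem.List.slice_zero_start, he, PySem.List.slice_to_natCast]
    · have he : (kk : Int) + ((m : Int) - (kk : Int)) = ((m : Nat) : Int) := by omega
      simp only [he, PySem.List.slice_natCast]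
      exact List.take_of_length_le (by simp [hs2])
  · -- non-negative shifts
    rw [PySem.List.pyRange_one]
    simp only [sub_zero, Int.toNat_natCast, List.map_map]
    refine List.map_congr_left (fun j hj => ?_)
    rw [List.mem_range] at hj
    have ht : (0 : Int) + (j : Int) = (j : Int) := by omega
    simp only [Function.comp, ht, Int.abs_natCast]
    have hmax1 : max ((j : Int)) 0 = (j : Int) := by omega
    have hmax2 : max (-(j : Int)) 0 = 0 := by omega
    rw [hmax1, hmax2]
    refine Prod.ext ?_ ?_
    · have he : (j : Int) + ((m : Int) - (j : Int)) = ((m : Nat) : Int) := by omega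
      simp only [he, PySem.List.slice_natCast]
      exact List.take_of_length_le (by simp [hs1])
    · have he : (0 : Int) + ((m : Int) - (j : Int)) = ((m - j : Nat) : Int) := by omega
      simp only [PySem.List.slice_zero_start, he, PySem.List.slice_to_natCast]

-- ===== VERDICT (by name: the statement is the Claim_ definition above) =====
theorem convolve_generator_spec : Claim_equal_convolve_generator := by
  intro seq1 seq2 _
  exact convolve_generator_eq_alt seq1 seq2
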